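-- pv_equiv track=rewrite | github.com/MartinAltmayer/imageflow | imageflow.py | _centerRange
-- ===== SOURCE A (Python) =====
-- def _centerRange(start, center, stop):
--     """This generator returns all numbers from *start* to *stop*-1. It returns these numbers ordered by their
--     distance to *center*, starting with *center*.
--     """
--     yield center
--     i = 1
--     while center-i >= start or center+i < stop:
--         if center-i >= start:
--             yield center-i
--         if center+i < stop:
--             yield center+i
--         i += 1
-- ===== SOURCE B (Python) =====
-- def _centerRange(start, center, stop):
--     # center first, then every other value of the range sorted by distance from
--     # center; key 2*d - 1 for center-d and 2*d for center+d gives A's order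
--     # (closer first, and the lower value first on equal distance).
--     yield center
--     rest = list(range(start, center)) + list(range(center + 1, stop))
--     rest.sort(key=lambda v: 2 * abs(v - center) - (v < center))
--     yield from rest
-- ===== Notes on version B (the rewrite author's own statement) =====
-- stated objective: simpler
-- what changed: The incremental while-loop that probes center-i and center+i one distance at a time is replaced by building the two complementary ranges below and above center and sorting them once by a distance-from-center key.
import Mathlib
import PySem

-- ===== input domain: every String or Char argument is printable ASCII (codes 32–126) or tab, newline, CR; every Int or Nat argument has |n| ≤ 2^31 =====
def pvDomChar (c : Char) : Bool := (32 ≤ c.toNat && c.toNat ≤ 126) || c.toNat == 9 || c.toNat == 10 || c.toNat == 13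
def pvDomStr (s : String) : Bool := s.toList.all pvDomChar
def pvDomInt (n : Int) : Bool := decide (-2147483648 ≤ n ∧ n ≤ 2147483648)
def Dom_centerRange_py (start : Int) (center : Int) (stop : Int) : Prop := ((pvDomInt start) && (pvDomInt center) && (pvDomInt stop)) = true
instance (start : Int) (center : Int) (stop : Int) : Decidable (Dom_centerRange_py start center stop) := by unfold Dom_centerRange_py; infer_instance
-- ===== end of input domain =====

-- B replaces A's step-by-step while loop by one sort of the remaining range
-- values under a distance-from-center key (objective: simpler).

-- ===== PORT A =====
-- the while loop of A: at each i, yield center-i (if ≥ start) then center+i (if < stop)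
def centerRangeLoop (start : Int) (center : Int) (stop : Int) (i : Int) : List Int :=
  if start ≤ center - i ∨ center + i < stop then
    ((if start ≤ center - i then [center - i] else []) ++
     (if center + i < stop then [center + i] else [])) ++
    centerRangeLoop start center stop (i + 1)
  else []
termination_by (max (center - start) (stop - 1 - center) + 1 - i).toNat
decreasing_by omega

def centerRange_py (start : Int) (center : Int) (stop : Int) : List Int :=
  center :: centerRangeLoop start center stop 1

-- ===== PORT B =====
def centerRange_py_alt (start : Int) (center : Int) (stop : Int) : List Int :=
  center ::
    PySem.List.sorted
      (PySem.List.pyRange start center 1 ++ PySem.List.pyRange (center + 1) stop 1)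
      (fun v => 2 * |v - center| - (if v < center then 1 else 0))

-- ===== PRECONDITION & SPEC =====
def Spec_centerRange_py (start : Int) (center : Int) (stop : Int) (out : List Int) : Prop := out = centerRange_py_alt start center stop
instance (start : Int) (center : Int) (stop : Int) (out : List Int) : Decidable (Spec_centerRange_py start center stop out) := by unfold Spec_centerRange_py; infer_instance

-- ===== CLAIM (what is proved, stated in full; the proofs are below) =====
def Claim_equal_centerRange_py : Prop := ∀ (start : Int) (center : Int) (stop : Int), Dom_centerRange_py start center stop → Spec_centerRange_py start center stop (centerRange_py start center stop)

-- ===== LEMMAS AND PROOFS =====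

-- A's loop from i emits exactly the values of [start, center-i] and [center+i, stop-1]
theorem centerRangeLoop_perm (start center stop i : Int) :
    (centerRangeLoop start center stop i).Perm
      (PySem.List.pyRange start (center - i + 1) 1 ++ PySem.List.pyRange (center + i) stop 1) := by
  unfold centerRangeLoop
  split
  · rename_i h
    have ih := centerRangeLoop_perm start center stop (i + 1)
    have e1 : center - (i + 1) + 1 = center - i := by ring
    have e2 : center + (i + 1) = center + i + 1 := by ring
    rw [e1, e2] at ih
    by_cases hd : start ≤ center - i
    · have hsucc : PySem.List.pyRange start (center - i + 1) 1 =
          PySem.List.pyRange start (center - i) 1 ++ [center - i] :=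
        PySem.List.pyRange_one_succ_right hd
      by_cases hu : center + i < stop
      · rw [if_pos hd, if_pos hu, hsucc, PySem.List.pyRange_one_cons hu]
        apply List.Perm.trans (l₂ := (center - i) :: (center + i) ::
          (PySem.List.pyRange start (center - i) 1 ++ PySem.List.pyRange (center + i + 1) stop 1))
        · simpa using ((ih.cons (center + i)).cons (center - i))
        · rw [List.append_assoc, List.singleton_append]
          exact List.Perm.trans (List.Perm.cons _ List.perm_middle.symm) List.perm_middle.symm
      · have hn1 : PySem.List.pyRange (center + i) stop 1 = [] :=
          PySem.List.pyRange_one_eq_nil (by omega)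
        have hn2 : PySem.List.pyRange (center + i + 1) stop 1 = [] :=
          PySem.List.pyRange_one_eq_nil (by omega)
        rw [if_pos hd, if_neg hu, hsucc, hn1]
        rw [hn2, List.append_nil] at ih
        apply List.Perm.trans (l₂ := (center - i) :: PySem.List.pyRange start (center - i) 1)
        · simpa using ih.cons (center - i)
        · simpa using (List.perm_middle (a := center - i)
            (l₁ := PySem.List.pyRange start (center - i) 1) (l₂ := ([] : List Int))).symm
    · have hu : center + i < stop := by tauto
      have hn1 : PySem.List.pyRange start (center - i + 1) 1 = [] :=
        PySem.List.pyRange_one_eq_nil (by omega)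
      have hn2 : PySem.List.pyRange start (center - i) 1 = [] :=
        PySem.List.pyRange_one_eq_nil (by omega)
      rw [if_neg hd, if_pos hu, hn1, PySem.List.pyRange_one_cons hu]
      rw [hn2, List.nil_append] at ih
      simpa using ih.cons (center + i)
  · rename_i h
    rw [PySem.List.pyRange_one_eq_nil (a := start) (b := center - i + 1) (by omega),
      PySem.List.pyRange_one_eq_nil (a := center + i) (b := stop) (by omega)]
    simp
termination_by (max (center - start) (stop - 1 - center) + 1 - i).toNat
decreasing_by omega

-- the sort key of B
def crKey (center : Int) (v : Int) : Int := 2 * |v - center| - (if v < center then 1 else 0)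

theorem crKey_lower (center b i : Int) (hb : b ≤ center - i ∨ center + i ≤ b) (hi : 1 ≤ i) :
    2 * i - 1 ≤ crKey center b := by
  unfold crKey
  rcases abs_cases (b - center) with ⟨he, _⟩ | ⟨he, _⟩ <;> rw [he] <;> split <;> omega

theorem crKey_down (center i : Int) (hi : 1 ≤ i) : crKey center (center - i) = 2 * i - 1 := by
  unfold crKey
  rcases abs_cases (center - i - center) with ⟨he, _⟩ | ⟨he, _⟩ <;> rw [he] <;> split <;> omega

theorem crKey_up (center i : Int) (hi : 1 ≤ i) : crKey center (center + i) = 2 * i := by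
  unfold crKey
  rcases abs_cases (center + i - center) with ⟨he, _⟩ | ⟨he, _⟩ <;> rw [he] <;> split <;> omega

theorem mem_centerRangeLoop (start center stop i b : Int)
    (hb : b ∈ centerRangeLoop start center stop i) :
    (start ≤ b ∧ b ≤ center - i) ∨ (center + i ≤ b ∧ b < stop) := by
  have h := (centerRangeLoop_perm start center stop i).mem_iff.mp hb
  rw [List.mem_append, PySem.List.mem_pyRange_one, PySem.List.mem_pyRange_one] at h
  omega

-- A's loop output is strictly increasing under B's key
theorem centerRangeLoop_pairwise (start center stop i : Int) (hi : 1 ≤ i) :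
    (centerRangeLoop start center stop i).Pairwise (fun a b => crKey center a < crKey center b) := by
  unfold centerRangeLoop
  split
  · have ih := centerRangeLoop_pairwise start center stop (i + 1) (by omega)
    have hnext : ∀ b ∈ centerRangeLoop start center stop (i + 1), 2 * i < crKey center b := by
      intro b hb
      have h1 := mem_centerRangeLoop start center stop (i + 1) b hb
      have h2 := crKey_lower center b (i + 1) (by omega) (by omega)
      omega
    have hkd := crKey_down center i hi
    have hku := crKey_up center i hi
    rw [List.pairwise_append]
    refine ⟨?_, ih, ?_⟩
    · by_cases hd : start ≤ center - i <;> by_cases hu : center + i < stop <;>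
        simp [hd, hu] <;> omega
    · intro a ha b hb
      have hbk := hnext b hb
      have hak : crKey center a ≤ 2 * i := by
        rcases List.mem_append.mp ha with h | h <;> split at h <;> simp at h <;> subst h <;> omega
      omega
  · simp
termination_by (max (center - start) (stop - 1 - center) + 1 - i).toNat
decreasing_by omega

-- ===== VERDICT (by name: the statement is the Claim_ definition above) =====
theorem centerRange_py_spec : Claim_equal_centerRange_py := by
  intro start center stop _
  unfold Spec_centerRange_py centerRange_py centerRange_py_alt
  congr 1
  refine (PySem.List.sorted_eq_of_perm_of_pairwise_lt _ _ _ ?_ ?_).symm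
  · have h := centerRangeLoop_perm start center stop 1
    have e : center - 1 + 1 = center := by ring
    rw [e] at h
    exact h
  · exact centerRangeLoop_pairwise start center stop 1 (by omega)
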